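-- pv_equiv track=rewrite | github.com/minbros/coding-test-practice | 프로그래머스/2/42583. 다리를 지나는 트럭/다리를 지나는 트럭.py | solution
-- ===== SOURCE A (Python) =====
-- def solution(bridge_length, weight, truck_weights):
--     from collections import deque
--
--     time = 0
--     bridge = deque()
--     times = deque()
--
--     while len(truck_weights) or len(bridge):
--         if len(times) and times[0] <= time:
--             bridge.popleft()
--             times.popleft()
--
--         if len(truck_weights) and sum(bridge) + truck_weights[0] <= weight:
--             bridge.append(truck_weights.pop(0))
--             times.append(time + bridge_length)
--
--         time += 1
--
--     return time
-- ===== SOURCE B (Python) =====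
-- def solution(bridge_length, weight, truck_weights):
--     # Event-driven simulation: jump straight from one truck's entry time to the
--     # next instead of ticking second by second.  A truck entered at time e is off
--     # the bridge at time e + max(bridge_length, 1); the next truck enters as soon
--     # as the running load (plus itself) fits.  One pass over the trucks.
--     if not truck_weights:
--         return 0
--     L = bridge_length if bridge_length > 1 else 1
--     deps = []   # departure times of trucks currently on the bridge (FIFO)
--     wts = []    # their weights, parallel to deps
--     head = 0    # front index of the FIFO
--     load = 0    # sum of weights still on the bridge
--     t = 0       # candidate entry time for the next truck
--     entry = 0   # entry time of the most recently entered truck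
--     for w in truck_weights:
--         while head < len(deps) and (deps[head] <= t or load + w > weight):
--             if deps[head] > t:
--                 t = deps[head]
--             load -= wts[head]
--             head += 1
--         entry = t
--         deps.append(t + L)
--         wts.append(w)
--         load += w
--         t += 1
--     return entry + L + 1
-- ===== Notes on version B (the rewrite author's own statement) =====
-- stated objective: alternative
-- what changed: Replaces A's second-by-second simulation (which re-sums the whole bridge and pops list[0] every tick) with an event-driven simulation that jumps straight from one truck's entry time to the next, keeping a running load and a front-index FIFO of departure times; intended as faster (a timing run saw A time out at n=16 where B returned, but could not measure a ratio because A never finished), recorded label is faster:none.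
import Mathlib
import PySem

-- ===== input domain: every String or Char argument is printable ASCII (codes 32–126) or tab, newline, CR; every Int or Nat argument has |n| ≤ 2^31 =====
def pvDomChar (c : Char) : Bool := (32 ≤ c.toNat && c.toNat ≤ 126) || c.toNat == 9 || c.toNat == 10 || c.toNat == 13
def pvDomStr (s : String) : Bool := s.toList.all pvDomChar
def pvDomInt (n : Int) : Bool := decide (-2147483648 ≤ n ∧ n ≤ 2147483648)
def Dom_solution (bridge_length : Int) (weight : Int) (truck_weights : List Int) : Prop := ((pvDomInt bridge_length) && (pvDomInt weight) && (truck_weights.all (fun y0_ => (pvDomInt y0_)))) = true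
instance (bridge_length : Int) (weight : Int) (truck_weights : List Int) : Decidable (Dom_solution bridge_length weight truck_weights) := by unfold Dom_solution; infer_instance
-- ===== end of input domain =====

-- B replaces A's second-by-second bridge simulation by an event-driven one (running load,
-- jump straight to each truck's entry time); equivalence is about the RETURN value only
-- (the Python A empties its truck_weights argument in place via pop(0), B does not).

-- ===== PORT A =====
-- A's `while` loop, one fuel unit per tick. The fuel bound n*max(bl,1)+2 is an upper bound
-- on the number of iterations A performs on inputs satisfying Pre_solution (proved below);
-- on those inputs the loop always ends by its own condition, never by fuel.
def solutionLoop (bl W : Int) : Nat → Int → List Int → List Int → List Int → Int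
  | 0, time, _, _, _ => time
  | fuel+1, time, bridge, times, tws =>
    if tws.length ≠ 0 ∨ bridge.length ≠ 0 then
      -- if len(times) and times[0] <= time: bridge.popleft(); times.popleft()
      let pop := times ≠ [] ∧ times.headI ≤ time
      let bridge1 := if pop then bridge.tail else bridge
      let times1 := if pop then times.tail else times
      -- if len(truck_weights) and sum(bridge) + truck_weights[0] <= weight: append
      match tws with
      | w :: wrest =>
        if bridge1.sum + w ≤ W then
          solutionLoop bl W fuel (time+1) (bridge1 ++ [w]) (times1 ++ [time + bl]) wrest
        else
          solutionLoop bl W fuel (time+1) bridge1 times1 (w :: wrest)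
      | [] => solutionLoop bl W fuel (time+1) bridge1 times1 []
    else time

def solution (bridge_length : Int) (weight : Int) (truck_weights : List Int) : Int :=
  solutionLoop bridge_length weight
    (truck_weights.length * (max bridge_length 1).toNat + 2) 0 [] [] truck_weights

-- ===== PORT B =====
-- Source B's inner `while`: pop departed / overloading trucks off the front of the FIFO,
-- advancing t to each popped departure time.
def departB (W w : Int) : Int → Int → List (Int × Int) → Int × Int × List (Int × Int)
  | t, load, [] => (t, load, [])
  | t, load, (d, wj) :: rest =>
    if d ≤ t ∨ W < load + w then departB W w (max t d) (load - wj) rest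
    else (t, load, (d, wj) :: rest)

-- Source B's `for w in truck_weights` loop; the FIFO deps/wts with its head index is the list q.
def runB (W L : Int) : List Int → Int → Int → List (Int × Int) → Int → Int
  | [], _, _, _, entry => entry + L + 1
  | w :: rest, t, load, q, _ =>
    match departB W w t load q with
    | (t', load', q') => runB W L rest (t' + 1) (load' + w) (q' ++ [(t' + L, w)]) t'

def solution_alt (bridge_length : Int) (weight : Int) (truck_weights : List Int) : Int :=
  match truck_weights with
  | [] => 0
  | _ :: _ =>
    runB weight (if 1 < bridge_length then bridge_length else 1) truck_weights 0 0 [] 0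

-- ===== PRECONDITION & SPEC =====
-- A's while loop never terminates when some truck is heavier than the bridge limit
-- (that truck can never enter); Pre_ excludes exactly those inputs, on which A diverges.
def Pre_solution (bridge_length : Int) (weight : Int) (truck_weights : List Int) : Prop :=
  ∀ x ∈ truck_weights, x ≤ weight
instance (bridge_length : Int) (weight : Int) (truck_weights : List Int) : Decidable (Pre_solution bridge_length weight truck_weights) := by unfold Pre_solution; infer_instance

def pvWitness_solution : Int × Int × List Int := (2, 10, [7, 4, 5])

def Spec_solution (bridge_length : Int) (weight : Int) (truck_weights : List Int) (out : Int) : Prop := out = solution_alt bridge_length weight truck_weights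
instance (bridge_length : Int) (weight : Int) (truck_weights : List Int) (out : Int) : Decidable (Spec_solution bridge_length weight truck_weights out) := by unfold Spec_solution; infer_instance

-- ===== CLAIM (what is proved, stated in full; the proofs are below) =====
def Claim_equal_solution : Prop := ∀ (bridge_length : Int) (weight : Int) (truck_weights : List Int), Dom_solution bridge_length weight truck_weights → Pre_solution bridge_length weight truck_weights → Spec_solution bridge_length weight truck_weights (solution bridge_length weight truck_weights)

-- ===== LEMMAS AND PROOFS =====

-- Abstract state: E is the list of (entry time, weight) of the trucks on the bridge, in
-- entry order.  A's concrete state is (bridgeOf E, timesOf bl E); B's is (loadOf E, qOf L E)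
-- where L = max bl 1 (a truck entered at e is popped by A at tick e + L exactly).
def bridgeOf (E : List (Int × Int)) : List Int := E.map Prod.snd
def timesOf (bl : Int) (E : List (Int × Int)) : List Int := E.map (fun p => p.1 + bl)
def qOf (L : Int) (E : List (Int × Int)) : List (Int × Int) := E.map (fun p => (p.1 + L, p.2))
def loadOf (E : List (Int × Int)) : Int := (E.map Prod.snd).sum

-- Invariant at the start of a tick t: entries strictly increase, every entry is < t,
-- and no truck's effective departure time e + L is past (all ≥ t).
def InvP (L t : Int) (E : List (Int × Int)) : Prop :=
  List.Pairwise (fun p q => p.1 < q.1) E ∧ (∀ p ∈ E, p.1 < t) ∧ (∀ p ∈ E, t ≤ p.1 + L)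


-- ---- small facts about the state maps ----
theorem bridgeOf_nil : bridgeOf [] = [] := rfl
theorem timesOf_nil (bl : Int) : timesOf bl [] = [] := rfl
theorem sum_bridgeOf (E : List (Int × Int)) : (bridgeOf E).sum = loadOf E := rfl

-- ---- single-tick unfoldings of A's loop ----
theorem loop_done (bl W : Int) : ∀ (fuel : Nat) (t : Int), solutionLoop bl W fuel t [] [] [] = t
  | 0, _ => rfl
  | _+1, _ => by simp [solutionLoop]

theorem tick_pop_enter (bl W : Int) (fuel : Nat) (t t0 w : Int) (br trest wrest : List Int)
    (h0 : t0 ≤ t) (hfit : br.tail.sum + w ≤ W) :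
    solutionLoop bl W (fuel+1) t br (t0 :: trest) (w :: wrest)
      = solutionLoop bl W fuel (t+1) (br.tail ++ [w]) (trest ++ [t + bl]) wrest := by
  simp [solutionLoop, h0, hfit]

theorem tick_pop_noenter (bl W : Int) (fuel : Nat) (t t0 w : Int) (br trest wrest : List Int)
    (h0 : t0 ≤ t) (hfit : ¬ (br.tail.sum + w ≤ W)) :
    solutionLoop bl W (fuel+1) t br (t0 :: trest) (w :: wrest)
      = solutionLoop bl W fuel (t+1) br.tail trest (w :: wrest) := by
  simp [solutionLoop, h0, hfit]

theorem tick_nopop_enter (bl W : Int) (fuel : Nat) (t w : Int) (br times wrest : List Int)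
    (hpop : ¬ (times ≠ [] ∧ times.headI ≤ t)) (hfit : br.sum + w ≤ W) :
    solutionLoop bl W (fuel+1) t br times (w :: wrest)
      = solutionLoop bl W fuel (t+1) (br ++ [w]) (times ++ [t + bl]) wrest := by
  simp only [solutionLoop, if_neg hpop]
  rw [if_pos (by simp), if_pos hfit]

theorem tick_nopop_noenter (bl W : Int) (fuel : Nat) (t w : Int) (br times wrest : List Int)
    (hpop : ¬ (times ≠ [] ∧ times.headI ≤ t)) (hfit : ¬ (br.sum + w ≤ W)) :
    solutionLoop bl W (fuel+1) t br times (w :: wrest)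
      = solutionLoop bl W fuel (t+1) br times (w :: wrest) := by
  simp only [solutionLoop, if_neg hpop, if_neg hfit]
  rw [if_pos (by simp)]

theorem tick_empty_pop (bl W : Int) (fuel : Nat) (t t0 : Int) (br trest : List Int)
    (hbr : br ≠ []) (h0 : t0 ≤ t) :
    solutionLoop bl W (fuel+1) t br (t0 :: trest) []
      = solutionLoop bl W fuel (t+1) br.tail trest [] := by
  simp [solutionLoop, h0, hbr]

theorem tick_empty_nopop (bl W : Int) (fuel : Nat) (t : Int) (br times : List Int)
    (hbr : br ≠ []) (hpop : ¬ (times ≠ [] ∧ times.headI ≤ t)) :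
    solutionLoop bl W (fuel+1) t br times []
      = solutionLoop bl W fuel (t+1) br times [] := by
  simp only [solutionLoop, if_neg hpop]
  rw [if_pos (by simp [hbr])]

-- ---- facts about B's inner while loop ----
theorem departB_le (W w : Int) : ∀ (q : List (Int × Int)) (t load : Int), t ≤ (departB W w t load q).1
  | [], t, load => le_refl t
  | (d, wj) :: rest, t, load => by
    simp only [departB]
    split
    · exact le_trans (le_max_left t d) (departB_le W w rest (max t d) (load - wj))
    · exact le_refl t

theorem departB_fst_mem (W w : Int) : ∀ (q : List (Int × Int)) (t load : Int),
    (departB W w t load q).1 = t ∨ ∃ p ∈ q, (departB W w t load q).1 = p.1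
  | [], t, load => Or.inl rfl
  | (d, wj) :: rest, t, load => by
    simp only [departB]
    split
    · rcases departB_fst_mem W w rest (max t d) (load - wj) with h | ⟨p, hp, h⟩
      · rcases max_cases t d with ⟨he, _⟩ | ⟨he, _⟩
        · exact Or.inl (by rw [h, he])
        · exact Or.inr ⟨(d, wj), by simp, by rw [h, he]⟩
      · exact Or.inr ⟨p, by simp [hp], h⟩
    · exact Or.inl rfl

theorem departB_time_irrel (W w t1 t2 load d wj : Int) (q : List (Int × Int))
    (hover : W < load + w) (h1 : t1 ≤ d) (h2 : t2 ≤ d) :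
    departB W w t1 load ((d, wj) :: q) = departB W w t2 load ((d, wj) :: q) := by
  simp [departB, hover, max_eq_right h1, max_eq_right h2]

-- ---- the advance lemma: one truck's wait-and-enter phase ----
-- Given the invariant, B's departB computes exactly the tick t' at which A lets the next
-- truck w enter, the surviving bridge contents E', and A's loop ticks from t to t'+1.
def AdvGoal (bl W L w : Int) (E : List (Int × Int)) (t : Int) : Prop :=
  ∃ t' E',
    departB W w t (loadOf E) (qOf L E) = (t', loadOf E', qOf L E') ∧
    InvP L (t'+1) (E' ++ [(t', w)]) ∧
    ∀ (rest : List Int) (fuel : Nat),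
      solutionLoop bl W (fuel + ((t' - t).toNat + 1)) t (bridgeOf E) (timesOf bl E) (w :: rest) =
      solutionLoop bl W fuel (t' + 1) (bridgeOf E' ++ [w]) (timesOf bl E' ++ [t' + bl]) rest


theorem bridgeOf_cons' (a b : Int) (E : List (Int × Int)) : bridgeOf ((a, b) :: E) = b :: bridgeOf E := rfl
theorem timesOf_cons' (bl a b : Int) (E : List (Int × Int)) : timesOf bl ((a, b) :: E) = (a + bl) :: timesOf bl E := rfl
theorem qOf_cons' (L a b : Int) (E : List (Int × Int)) : qOf L ((a, b) :: E) = (a + L, b) :: qOf L E := rfl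
theorem loadOf_cons' (a b : Int) (E : List (Int × Int)) : loadOf ((a, b) :: E) = b + loadOf E := by simp [loadOf]
theorem advance (bl W L w : Int) (hL : L = max bl 1) (hw : w ≤ W) :
    ∀ (E : List (Int × Int)) (t : Int), InvP L t E → AdvGoal bl W L w E t := by
  have hbl : 1 ≤ L := hL ▸ le_max_right bl 1
  have hLb : (L = bl ∧ 1 ≤ bl) ∨ (L = 1 ∧ bl ≤ 1) := by
    rw [hL]; rcases max_cases bl 1 with ⟨h1, h2⟩ | ⟨h1, h2⟩
    · exact Or.inl ⟨h1, h2⟩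
    · exact Or.inr ⟨h1, by omega⟩
  intro E
  induction E with
  | nil =>
    intro t _
    refine ⟨t, [], rfl, ?_, ?_⟩
    · refine ⟨by simp, ?_, ?_⟩
      · intro p hp
        simp only [List.nil_append, List.mem_singleton] at hp
        subst hp; show t < t + 1; omega
      · intro p hp
        simp only [List.nil_append, List.mem_singleton] at hp
        subst hp; show t + 1 ≤ t + L; omega
    · intro rest fuel
      have h1 : (t - t).toNat + 1 = 1 := by omega
      rw [h1, bridgeOf_nil, timesOf_nil,
        tick_nopop_enter bl W fuel t w [] [] rest (by simp) (by simpa using hw)]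
  | cons hd E1 IH =>
    obtain ⟨e0, w0⟩ := hd
    intro t
    have H : ∀ d : Nat, ∀ t : Int, (e0 + L - t).toNat = d → InvP L t ((e0, w0) :: E1) →
        AdvGoal bl W L w ((e0, w0) :: E1) t := by
      intro d
      induction d using Nat.strong_induction_on with
      | _ d IH2 =>
        intro t hdm hInv
        obtain ⟨hchain, hpast, hdep⟩ := hInv
        have he0t : e0 < t := hpast (e0, w0) (by simp)
        have hD0 : t ≤ e0 + L := hdep (e0, w0) (by simp)
        have htail : ∀ p ∈ E1, e0 < p.1 := by
          intro p hp; exact (List.pairwise_cons.mp hchain).1 p hp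
        by_cases hpop : e0 + L ≤ t
        · -- the head truck leaves the bridge at this tick (e0 + L = t)
          have hteq : t = e0 + L := le_antisymm hD0 hpop
          have hApop : e0 + bl ≤ t := by rcases hLb with ⟨h1, h2⟩ | ⟨h1, h2⟩ <;> omega
          have hstep : departB W w t (loadOf ((e0, w0) :: E1)) (qOf L ((e0, w0) :: E1))
              = departB W w t (loadOf E1) (qOf L E1) := by
            rw [qOf_cons', loadOf_cons']
            simp only [departB, if_pos (Or.inl hpop)]
            rw [max_eq_left hpop]
            ring_nf
          by_cases hfit : loadOf E1 + w ≤ W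
          · -- and the new truck enters in the same tick
            have hstop : departB W w t (loadOf E1) (qOf L E1) = (t, loadOf E1, qOf L E1) := by
              cases E1 with
              | nil => simp [departB, qOf, loadOf]
              | cons hd1 E1' =>
                obtain ⟨e1, w1⟩ := hd1
                have h1 : e0 < e1 := htail (e1, w1) (by simp)
                rw [qOf_cons', departB, if_neg (by push_neg; exact ⟨by omega, by omega⟩)]
            refine ⟨t, E1, by rw [hstep, hstop], ?_, ?_⟩
            · refine ⟨?_, ?_, ?_⟩
              · rw [List.pairwise_append]
                refine ⟨(List.pairwise_cons.mp hchain).2, by simp, ?_⟩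
                intro p hp q hq; simp only [List.mem_singleton] at hq; subst hq
                exact hpast p (by simp [hp])
              · intro p hp; rcases List.mem_append.mp hp with h | h
                · have := hpast p (by simp [h]); omega
                · simp only [List.mem_singleton] at h; subst h; show t < t + 1; omega
              · intro p hp; rcases List.mem_append.mp hp with h | h
                · have := htail p h; omega
                · simp only [List.mem_singleton] at h; subst h; show t + 1 ≤ t + L; omega
            · intro rest fuel
              have h1 : (t - t).toNat + 1 = 1 := by omega
              rw [h1, bridgeOf_cons', timesOf_cons',
                tick_pop_enter bl W fuel t (e0 + bl) w (w0 :: bridgeOf E1) (timesOf bl E1) rest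
                  hApop (by simpa [sum_bridgeOf] using hfit)]
              simp
          · -- head leaves but the next truck still does not fit
            have hE1ne : E1 ≠ [] := by
              intro h; subst h; simp [loadOf] at hfit; omega
            have hInv1 : InvP L (t+1) E1 := by
              refine ⟨(List.pairwise_cons.mp hchain).2, ?_, ?_⟩
              · intro p hp; have := hpast p (by simp [hp]); omega
              · intro p hp; have := htail p hp; have := hdep p (by simp [hp]); omega
            obtain ⟨t', E', hdep', hInv', heq'⟩ := IH (t+1) hInv1
            have ht'ge : t + 1 ≤ t' := by
              have h := departB_le W w (qOf L E1) (t+1) (loadOf E1)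
              rw [hdep'] at h; exact h
            refine ⟨t', E', ?_, hInv', ?_⟩
            · rw [hstep]
              obtain ⟨⟨e1, w1⟩, E1', rfl⟩ := List.exists_cons_of_ne_nil hE1ne
              have h1 : e0 < e1 := htail (e1, w1) (by simp)
              rw [qOf_cons'] at hdep' ⊢
              rw [departB_time_irrel W w t (t+1) (loadOf ((e1,w1)::E1')) (e1+L) w1 (qOf L E1')
                (by have := loadOf_cons' e1 w1 E1'; omega) (by omega) (by omega)]
              exact hdep'
            · intro rest fuel
              have h2 : fuel + ((t' - t).toNat + 1) = (fuel + ((t' - (t+1)).toNat + 1)) + 1 := by omega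
              rw [h2, bridgeOf_cons', timesOf_cons',
                tick_pop_noenter bl W (fuel + ((t' - (t+1)).toNat + 1)) t (e0 + bl) w
                  (w0 :: bridgeOf E1) (timesOf bl E1) rest hApop
                  (by simpa [sum_bridgeOf] using hfit)]
              exact heq' rest fuel
        · -- head still crossing: t < e0 + L
          have hnopop : ¬ (e0 + bl ≤ t) := by
            rcases hLb with ⟨h1, h2⟩ | ⟨h1, h2⟩ <;> omega
          by_cases hfit : loadOf ((e0, w0) :: E1) + w ≤ W
          · -- the truck enters now, bridge untouched
            refine ⟨t, (e0, w0) :: E1, ?_, ?_, ?_⟩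
            · rw [qOf_cons', departB,
                if_neg (by push_neg; exact ⟨by omega, by have := loadOf_cons' e0 w0 E1; omega⟩)]
            · refine ⟨?_, ?_, ?_⟩
              · rw [List.pairwise_append]
                refine ⟨hchain, by simp, ?_⟩
                intro p hp q hq; simp only [List.mem_singleton] at hq; subst hq
                exact hpast p hp
              · intro p hp; rcases List.mem_append.mp hp with h | h
                · have := hpast p h; omega
                · simp only [List.mem_singleton] at h; subst h; show t < t + 1; omega
              · intro p hp; rcases List.mem_append.mp hp with h | h
                · rcases List.mem_cons.mp h with h' | h'
                  · subst h'; show t + 1 ≤ e0 + L; omega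
                  · have := htail p h'; have := hdep p (by simp [h']); omega
                · simp only [List.mem_singleton] at h; subst h; show t + 1 ≤ t + L; omega
            · intro rest fuel
              have h1 : (t - t).toNat + 1 = 1 := by omega
              rw [h1, tick_nopop_enter bl W fuel t w (bridgeOf ((e0,w0)::E1)) (timesOf bl ((e0,w0)::E1)) rest
                (by rw [timesOf_cons']; push_neg; intro _; simp only [List.headI_cons]; omega)
                (by simpa [sum_bridgeOf] using hfit)]
          · -- overloaded: idle tick
            have hover : W < loadOf ((e0, w0) :: E1) + w := by omega
            have hInv1 : InvP L (t+1) ((e0, w0) :: E1) := by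
              refine ⟨hchain, ?_, ?_⟩
              · intro p hp; have := hpast p hp; omega
              · intro p hp; rcases List.mem_cons.mp hp with h' | h'
                · subst h'; show t + 1 ≤ e0 + L; omega
                · have := htail p h'; have := hdep p (by simp [h']); omega
            obtain ⟨t', E', hdep', hInv', heq'⟩ :=
              IH2 ((e0 + L - (t+1)).toNat) (by omega) (t+1) rfl hInv1
            have ht'ge : t + 1 ≤ t' := by
              have h := departB_le W w (qOf L ((e0, w0) :: E1)) (t+1) (loadOf ((e0, w0) :: E1))
              rw [hdep'] at h; exact h
            refine ⟨t', E', ?_, hInv', ?_⟩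
            · rw [qOf_cons'] at hdep' ⊢
              rw [departB_time_irrel W w t (t+1) (loadOf ((e0,w0)::E1)) (e0+L) w0 (qOf L E1)
                hover (by omega) (by omega)]
              exact hdep'
            · intro rest fuel
              have h2 : fuel + ((t' - t).toNat + 1) = (fuel + ((t' - (t+1)).toNat + 1)) + 1 := by omega
              rw [h2, tick_nopop_noenter bl W (fuel + ((t' - (t+1)).toNat + 1)) t w
                (bridgeOf ((e0,w0)::E1)) (timesOf bl ((e0,w0)::E1)) rest
                (by rw [timesOf_cons']; push_neg; intro _; simp only [List.headI_cons]; omega)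
                (by simpa [sum_bridgeOf] using hfit)]
              exact heq' rest fuel
    exact H _ t rfl


theorem drain (bl W L : Int) (hL : L = max bl 1) :
    ∀ (E0 : List (Int × Int)) (entry wl t : Int) (fuel : Nat),
      InvP L t (E0 ++ [(entry, wl)]) → (entry + L + 1 - t).toNat ≤ fuel →
      solutionLoop bl W fuel t (bridgeOf (E0 ++ [(entry, wl)])) (timesOf bl (E0 ++ [(entry, wl)])) []
        = entry + L + 1 := by
  have hbl : 1 ≤ L := hL ▸ le_max_right bl 1
  have hLb : (L = bl ∧ 1 ≤ bl) ∨ (L = 1 ∧ bl ≤ 1) := by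
    rw [hL]; rcases max_cases bl 1 with ⟨h1, h2⟩ | ⟨h1, h2⟩
    · exact Or.inl ⟨h1, h2⟩
    · exact Or.inr ⟨h1, by omega⟩
  intro E0
  induction E0 with
  | nil =>
    intro entry wl
    have H : ∀ d : Nat, ∀ (t : Int) (fuel : Nat), (entry + L - t).toNat = d →
        InvP L t [(entry, wl)] → (entry + L + 1 - t).toNat ≤ fuel →
        solutionLoop bl W fuel t (bridgeOf [(entry, wl)]) (timesOf bl [(entry, wl)]) []
          = entry + L + 1 := by
      intro d
      induction d using Nat.strong_induction_on with
      | _ d IH2 =>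
        intro t fuel hdm hInv hfuel
        obtain ⟨hchain, hpast, hdep⟩ := hInv
        have he0t : entry < t := hpast (entry, wl) (by simp)
        have hD0 : t ≤ entry + L := hdep (entry, wl) (by simp)
        cases fuel with
        | zero => omega
        | succ f =>
          rw [bridgeOf_cons', timesOf_cons', bridgeOf_nil, timesOf_nil]
          by_cases hpop : entry + L ≤ t
          · have hApop : entry + bl ≤ t := by rcases hLb with ⟨h1, h2⟩ | ⟨h1, h2⟩ <;> omega
            rw [tick_empty_pop bl W f t (entry + bl) [wl] [] (by simp) hApop]
            show solutionLoop bl W f (t+1) [] [] [] = entry + L + 1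
            rw [loop_done]; omega
          · have hnopop : ¬ (entry + bl ≤ t) := by
              rcases hLb with ⟨h1, h2⟩ | ⟨h1, h2⟩ <;> omega
            rw [tick_empty_nopop bl W f t [wl] [entry + bl] (by simp)
              (by push_neg; intro _; simp only [List.headI_cons]; omega)]
            have := IH2 ((entry + L - (t+1)).toNat) (by omega) (t+1) f rfl
              ⟨hchain, by intro p hp; simp only [List.mem_singleton] at hp; subst hp; show entry < t + 1; omega,
               by intro p hp; simp only [List.mem_singleton] at hp; subst hp; show t + 1 ≤ entry + L; omega⟩
              (by omega)
            rw [bridgeOf_cons', timesOf_cons', bridgeOf_nil, timesOf_nil] at this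
            exact this
    intro t fuel hInv hfuel
    exact H _ t fuel rfl hInv hfuel
  | cons hd E0' IH =>
    obtain ⟨e0, w0⟩ := hd
    intro entry wl
    have H : ∀ d : Nat, ∀ (t : Int) (fuel : Nat), (e0 + L - t).toNat = d →
        InvP L t ((e0, w0) :: (E0' ++ [(entry, wl)])) → (entry + L + 1 - t).toNat ≤ fuel →
        solutionLoop bl W fuel t (bridgeOf ((e0, w0) :: (E0' ++ [(entry, wl)])))
            (timesOf bl ((e0, w0) :: (E0' ++ [(entry, wl)]))) [] = entry + L + 1 := by
      intro d
      induction d using Nat.strong_induction_on with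
      | _ d IH2 =>
        intro t fuel hdm hInv hfuel
        obtain ⟨hchain, hpast, hdep⟩ := hInv
        have he0t : e0 < t := hpast (e0, w0) (by simp)
        have hD0 : t ≤ e0 + L := hdep (e0, w0) (by simp)
        have hlast : t ≤ entry + L := hdep (entry, wl) (by simp)
        have htail : ∀ p ∈ E0' ++ [(entry, wl)], e0 < p.1 := by
          intro p hp; exact (List.pairwise_cons.mp hchain).1 p hp
        cases fuel with
        | zero => omega
        | succ f =>
          rw [bridgeOf_cons', timesOf_cons']
          by_cases hpop : e0 + L ≤ t
          · have hApop : e0 + bl ≤ t := by rcases hLb with ⟨h1, h2⟩ | ⟨h1, h2⟩ <;> omega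
            rw [tick_empty_pop bl W f t (e0 + bl) (w0 :: bridgeOf (E0' ++ [(entry, wl)]))
              (timesOf bl (E0' ++ [(entry, wl)])) (by simp) hApop]
            show solutionLoop bl W f (t+1) (bridgeOf (E0' ++ [(entry, wl)]))
              (timesOf bl (E0' ++ [(entry, wl)])) [] = entry + L + 1
            refine IH entry wl (t+1) f ⟨(List.pairwise_cons.mp hchain).2, ?_, ?_⟩ (by omega)
            · intro p hp; have := hpast p (by simp [hp]); omega
            · intro p hp; have := htail p hp; omega
          · have hnopop : ¬ (e0 + bl ≤ t) := by
              rcases hLb with ⟨h1, h2⟩ | ⟨h1, h2⟩ <;> omega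
            rw [tick_empty_nopop bl W f t (w0 :: bridgeOf (E0' ++ [(entry, wl)]))
              ((e0 + bl) :: timesOf bl (E0' ++ [(entry, wl)])) (by simp)
              (by push_neg; intro _; simp only [List.headI_cons]; omega)]
            have := IH2 ((e0 + L - (t+1)).toNat) (by omega) (t+1) f rfl
              ⟨hchain, by intro p hp; have := hpast p hp; omega,
               by intro p hp; rcases List.mem_cons.mp hp with h' | h'
                  · subst h'; show t + 1 ≤ e0 + L; omega
                  · have := htail p h'; have := hdep p (by simp [h']); omega⟩
              (by omega)
            rw [bridgeOf_cons', timesOf_cons'] at this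
            exact this
    intro t fuel hInv hfuel
    exact H _ t fuel rfl hInv hfuel


theorem loadOf_app_single (E : List (Int × Int)) (a b : Int) :
    loadOf (E ++ [(a, b)]) = loadOf E + b := by
  simp [loadOf]

theorem qOf_app_single (L : Int) (E : List (Int × Int)) (a b : Int) :
    qOf L (E ++ [(a, b)]) = qOf L E ++ [(a + L, b)] := by
  simp [qOf]

theorem bridgeOf_app_single (E : List (Int × Int)) (a b : Int) :
    bridgeOf (E ++ [(a, b)]) = bridgeOf E ++ [b] := by
  simp [bridgeOf]

theorem timesOf_app_single (bl : Int) (E : List (Int × Int)) (a b : Int) :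
    timesOf bl (E ++ [(a, b)]) = timesOf bl E ++ [a + bl] := by
  simp [timesOf]

theorem main_sim (bl W L : Int) (hL : L = max bl 1) :
    ∀ (tw : List Int) (E0 : List (Int × Int)) (entry wl : Int) (fuel : Nat),
      InvP L (entry+1) (E0 ++ [(entry, wl)]) → (∀ x ∈ tw, x ≤ W) →
      (tw.length + 1) * L.toNat ≤ fuel →
      solutionLoop bl W fuel (entry+1) (bridgeOf (E0 ++ [(entry, wl)])) (timesOf bl (E0 ++ [(entry, wl)])) tw
        = runB W L tw (entry+1) (loadOf (E0 ++ [(entry, wl)])) (qOf L (E0 ++ [(entry, wl)])) entry := by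
  have hbl : 1 ≤ L := hL ▸ le_max_right bl 1
  intro tw
  induction tw with
  | nil =>
    intro E0 entry wl fuel hInv htw hfuel
    rw [runB]
    refine drain bl W L hL E0 entry wl (entry+1) fuel hInv ?_
    have h1 : (entry + L + 1 - (entry + 1)).toNat = L.toNat := by omega
    simp at hfuel
    omega
  | cons w rest IH =>
    intro E0 entry wl fuel hInv htw hfuel
    obtain ⟨t', E', hdep', hInv', heq'⟩ :=
      advance bl W L w hL (htw w (by simp)) (E0 ++ [(entry, wl)]) (entry+1) hInv
    have ht'ge : entry + 1 ≤ t' := by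
      have h := departB_le W w (qOf L (E0 ++ [(entry, wl)])) (entry+1) (loadOf (E0 ++ [(entry, wl)]))
      rw [hdep'] at h; exact h
    have ht'lt : t' < (entry + 1) + L := by
      rcases departB_fst_mem W w (qOf L (E0 ++ [(entry, wl)])) (entry+1) (loadOf (E0 ++ [(entry, wl)]))
        with h | ⟨p, hp, h⟩
      · rw [hdep'] at h; simp only at h; omega
      · rw [hdep'] at h; simp only at h
        obtain ⟨q, hq, rfl⟩ := List.mem_map.mp hp
        have := hInv.2.1 q hq
        simp only at h; omega
    have hmul : (rest.length + 1 + 1) * L.toNat = (rest.length + 1) * L.toNat + L.toNat := by ring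
    have hkle : (t' - (entry + 1)).toNat + 1 ≤ L.toNat := by omega
    have hLle : L.toNat ≤ fuel := by
      have h1 := Nat.le_mul_of_pos_left L.toNat (show 0 < rest.length + 1 + 1 by omega)
      simp only [List.length_cons] at hfuel
      omega
    have hfsplit : fuel = (fuel - ((t' - (entry+1)).toNat + 1)) + ((t' - (entry+1)).toNat + 1) := by
      omega
    rw [hfsplit, heq' rest (fuel - ((t' - (entry+1)).toNat + 1))]
    rw [← bridgeOf_app_single E' t' w, ← timesOf_app_single bl E' t' w]
    have hIH := IH E' t' w (fuel - ((t' - (entry+1)).toNat + 1)) hInv'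
      (by intro x hx; exact htw x (by simp [hx]))
      (by simp only [List.length_cons] at hfuel; omega)
    rw [hIH, runB, hdep']
    simp only [loadOf_app_single, qOf_app_single]


-- ===== VERDICT (by name: the statement is the Claim_ definition above) =====
theorem solution_spec : Claim_equal_solution := by
  unfold Claim_equal_solution
  intro bl W tws hdom hpre
  unfold Spec_solution
  unfold Pre_solution at hpre
  cases tws with
  | nil =>
    unfold solution solution_alt
    rw [loop_done]
  | cons w rest =>
    have hbl : 1 ≤ max bl 1 := le_max_right bl 1
    have hw : w ≤ W := hpre w (by simp)
    have hLif : (if 1 < bl then bl else 1) = max bl 1 := by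
      rcases max_cases bl 1 with ⟨h1, h2⟩ | ⟨h1, h2⟩ <;> split_ifs <;> omega
    have hsm : (rest.length + 1) * (max bl 1).toNat = rest.length * (max bl 1).toNat + (max bl 1).toNat :=
      Nat.succ_mul _ _
    unfold solution solution_alt
    rw [hLif]
    have hfuel : (w::rest).length * (max bl 1).toNat + 2
        = (rest.length * (max bl 1).toNat + (max bl 1).toNat + 1) + 1 := by
      simp only [List.length_cons]; omega
    rw [hfuel, tick_nopop_enter bl W (rest.length * (max bl 1).toNat + (max bl 1).toNat + 1) 0 w
      [] [] rest (by simp) (by simpa using hw)]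
    have hInv : InvP (max bl 1) (0+1) ([] ++ [((0:Int), w)]) := by
      refine ⟨by simp, ?_, ?_⟩
      · intro p hp; simp only [List.nil_append, List.mem_singleton] at hp
        subst hp; show (0:Int) < 0 + 1; omega
      · intro p hp; simp only [List.nil_append, List.mem_singleton] at hp
        subst hp; show (0:Int) + 1 ≤ 0 + max bl 1; omega
    have h := main_sim bl W (max bl 1) rfl rest [] 0 w
      (rest.length * (max bl 1).toNat + (max bl 1).toNat + 1) hInv
      (by intro x hx; exact hpre x (by simp [hx])) (by omega)
    simp only [List.nil_append] at h
    show solutionLoop bl W (rest.length * (max bl 1).toNat + (max bl 1).toNat + 1) (0+1)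
      (bridgeOf [((0:Int), w)]) (timesOf bl [((0:Int), w)]) rest = _
    rw [h, runB]
    simp [departB, loadOf, qOf]
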